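-- pv_equiv track=rewrite | github.com/Swapnil97/Python-Programming | sortTheList.py | miniIndex
-- ===== SOURCE A (Python) =====
-- def miniIndex(List,lower,upper):
--     '''
--     OBJECTIVE:TO FIND THE INDEX OF MINIMUM ELEMENT OF THE LIST
--     INPUTS:1.List-LIST INPUTTED BY THE USER
--     RETURN:INDEX OF MINIMUM ELEMENT
--     '''
--     '''
--     APPROACH:BY USING RECURSION
--     '''
--     if lower==upper:
--         return upper
--     elif List[lower]<List[upper]:
--         return miniIndex(List,lower,upper-1)
--     else:
--         return miniIndex(List,lower+1,upper)
-- ===== SOURCE B (Python) =====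
-- def miniIndex(List, lower, upper):
--     # Single forward scan keeping the last index of the minimum seen so far
--     # (A's endpoint-elimination returns the last occurrence of the minimum).
--     best = lower
--     i = lower
--     while i != upper:
--         i += 1
--         if List[i] <= List[best]:
--             best = i
--     return best
-- ===== Notes on version B (the rewrite author's own statement) =====
-- stated objective: simpler
-- what changed: Replaces the two-ended recursive endpoint-elimination with a single forward scan that keeps the last index of the minimum (<= update), which is what A's tie-breaking computes.
import Mathlib
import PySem

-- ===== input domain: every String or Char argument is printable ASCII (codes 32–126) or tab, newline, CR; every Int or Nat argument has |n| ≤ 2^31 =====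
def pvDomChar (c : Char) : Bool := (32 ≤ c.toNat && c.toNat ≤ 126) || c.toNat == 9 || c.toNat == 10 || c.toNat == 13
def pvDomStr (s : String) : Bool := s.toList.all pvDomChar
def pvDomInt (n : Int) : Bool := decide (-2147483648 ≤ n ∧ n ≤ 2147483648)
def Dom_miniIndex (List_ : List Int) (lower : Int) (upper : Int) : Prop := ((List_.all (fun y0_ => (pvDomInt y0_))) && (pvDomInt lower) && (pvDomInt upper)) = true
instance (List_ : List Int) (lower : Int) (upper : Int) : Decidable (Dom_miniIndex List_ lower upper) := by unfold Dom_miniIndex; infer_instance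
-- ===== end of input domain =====

-- B replaces A's two-ended recursive endpoint elimination by a single forward
-- scan keeping the last index of the minimum (same value, O(1) space).

-- ===== PORT A =====
-- Fuel-indexed transliteration of A's recursion; the gap upper-lower shrinks by
-- one each call, so fuel (upper-lower).toNat+1 suffices on every input in Pre_.
-- pyGetD's default 0 stands for IndexError and is unreachable under Pre_.
def miniIndexGo : Nat → List Int → Int → Int → Int
  | 0, _, _, upper => upper
  | fuel+1, L, lower, upper =>
    if lower = upper then upper
    else if PySem.List.pyGetD L lower 0 < PySem.List.pyGetD L upper 0 then
      miniIndexGo fuel L lower (upper - 1)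
    else
      miniIndexGo fuel L (lower + 1) upper

def miniIndex (List_ : List Int) (lower : Int) (upper : Int) : Int :=
  miniIndexGo ((upper - lower).toNat + 1) List_ lower upper

-- ===== PORT B =====
-- Transliteration of Source B's while loop: fuel = number of iterations
-- (upper - lower); state is (i, best).
def miniIndexScan : Nat → List Int → Int → Int → Int
  | 0, _, _, best => best
  | fuel+1, L, i, best =>
    let j := i + 1
    miniIndexScan fuel L j
      (if PySem.List.pyGetD L j 0 ≤ PySem.List.pyGetD L best 0 then j else best)

def miniIndex_alt (List_ : List Int) (lower : Int) (upper : Int) : Int :=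
  miniIndexScan (upper - lower).toNat List_ lower lower

-- ===== PRECONDITION & SPEC =====
-- Pre_ = exactly where the Python A returns: lower = upper (returns at once,
-- no indexing), or lower < upper with both endpoints valid Python indices
-- (then every index touched lies between them). lower > upper recurses
-- forever; an out-of-range endpoint raises IndexError.
def Pre_miniIndex (List_ : List Int) (lower : Int) (upper : Int) : Prop :=
  lower = upper ∨
    (lower < upper ∧ PySem.Raise.InRange List_.length lower ∧
      PySem.Raise.InRange List_.length upper)
instance (List_ : List Int) (lower : Int) (upper : Int) : Decidable (Pre_miniIndex List_ lower upper) := by unfold Pre_miniIndex; infer_instance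

def pvWitness_miniIndex : List Int × Int × Int := ([3, 1, 2], 0, 2)

def Spec_miniIndex (List_ : List Int) (lower : Int) (upper : Int) (out : Int) : Prop := out = miniIndex_alt List_ lower upper
instance (List_ : List Int) (lower : Int) (upper : Int) (out : Int) : Decidable (Spec_miniIndex List_ lower upper out) := by unfold Spec_miniIndex; infer_instance

-- ===== CLAIM (what is proved, stated in full; the proofs are below) =====
def Claim_equal_miniIndex : Prop := ∀ (List_ : List Int) (lower : Int) (upper : Int), Dom_miniIndex List_ lower upper → Pre_miniIndex List_ lower upper → Spec_miniIndex List_ lower upper (miniIndex List_ lower upper)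

-- ===== LEMMAS AND PROOFS =====

-- m is the LAST index of the minimum of v on the integer interval [lo, hi].
def IsLM (v : Int → Int) (lo hi m : Int) : Prop :=
  lo ≤ m ∧ m ≤ hi ∧ (∀ i, lo ≤ i → i ≤ hi → v m ≤ v i) ∧
    (∀ i, m < i → i ≤ hi → v m < v i)

theorem IsLM_uniq {v : Int → Int} {lo hi m₁ m₂ : Int}
    (h₁ : IsLM v lo hi m₁) (h₂ : IsLM v lo hi m₂) : m₁ = m₂ := by
  obtain ⟨l₁, u₁, min₁, str₁⟩ := h₁
  obtain ⟨l₂, u₂, min₂, str₂⟩ := h₂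
  by_contra hne
  rcases lt_or_gt_of_ne hne with h | h
  · exact absurd (str₁ m₂ h u₂) (not_lt.2 (min₂ m₁ l₁ u₁))
  · exact absurd (str₂ m₁ h u₁) (not_lt.2 (min₁ m₂ l₂ u₂))

theorem miniIndexGo_isLM (L : List Int) :
    ∀ (f : Nat) (lo hi : Int), lo ≤ hi → (hi - lo).toNat < f →
      IsLM (fun i => PySem.List.pyGetD L i 0) lo hi (miniIndexGo f L lo hi) := by
  intro f
  induction f with
  | zero => intro lo hi _ hf; omega
  | succ f ih =>
    intro lo hi hle hf
    simp only [miniIndexGo]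
    by_cases heq : lo = hi
    · simp only [if_pos heq]
      refine ⟨by omega, le_refl _, ?_, ?_⟩
      · intro i h1 h2; simp [show i = hi by omega]
      · intro i h1 h2; omega
    · simp only [if_neg heq]
      have hlt : lo < hi := lt_of_le_of_ne hle heq
      by_cases hc : PySem.List.pyGetD L lo 0 < PySem.List.pyGetD L hi 0
      · simp only [if_pos hc]
        obtain ⟨l', u', min', str'⟩ := ih lo (hi - 1) (by omega) (by omega)
        refine ⟨l', by omega, ?_, ?_⟩
        · intro i h1 h2
          by_cases hi' : i ≤ hi - 1
          · exact min' i h1 hi'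
          · have : i = hi := by omega
            subst this
            exact le_of_lt (lt_of_le_of_lt (min' lo (le_refl _) (by omega)) hc)
        · intro i h1 h2
          by_cases hi' : i ≤ hi - 1
          · exact str' i h1 hi'
          · have : i = hi := by omega
            subst this
            exact lt_of_le_of_lt (min' lo (le_refl _) (by omega)) hc
      · simp only [if_neg hc]
        replace hc := not_lt.mp hc
        obtain ⟨l', u', min', str'⟩ := ih (lo + 1) hi (by omega) (by omega)
        refine ⟨by omega, u', ?_, ?_⟩
        · intro i h1 h2
          by_cases hi' : lo + 1 ≤ i
          · exact min' i hi' h2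
          · have : i = lo := by omega
            subst this
            exact le_trans (min' hi (by omega) (le_refl _)) hc
        · intro i h1 h2
          exact str' i h1 h2

theorem miniIndexScan_isLM (L : List Int) :
    ∀ (f : Nat) (lo i best hi : Int), i + (f : Int) = hi →
      IsLM (fun k => PySem.List.pyGetD L k 0) lo i best →
      IsLM (fun k => PySem.List.pyGetD L k 0) lo hi (miniIndexScan f L i best) := by
  intro f
  induction f with
  | zero =>
    intro lo i best hi hf hb
    have : i = hi := by omega
    subst this
    simpa [miniIndexScan] using hb
  | succ f ih =>
    intro lo i best hi hf hb
    simp only [miniIndexScan]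
    apply ih lo (i + 1) _ hi (by push_cast at hf ⊢; omega)
    obtain ⟨l', u', min', str'⟩ := hb
    by_cases hc : PySem.List.pyGetD L (i + 1) 0 ≤ PySem.List.pyGetD L best 0
    · simp only [if_pos hc]
      refine ⟨by omega, le_refl _, ?_, ?_⟩
      · intro k h1 h2
        by_cases hk : k ≤ i
        · exact le_trans hc (min' k h1 hk)
        · have : k = i + 1 := by omega
          simp [this]
      · intro k h1 h2; omega
    · simp only [if_neg hc]
      replace hc := not_le.mp hc
      refine ⟨l', by omega, ?_, ?_⟩
      · intro k h1 h2
        by_cases hk : k ≤ i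
        · exact min' k h1 hk
        · have : k = i + 1 := by omega
          subst this
          exact le_of_lt hc
      · intro k h1 h2
        by_cases hk : k ≤ i
        · exact str' k h1 hk
        · have : k = i + 1 := by omega
          subst this
          exact hc

-- ===== VERDICT (by name: the statement is the Claim_ definition above) =====
theorem miniIndex_spec : Claim_equal_miniIndex := by
  intro List_ lower upper _ hpre
  unfold Spec_miniIndex miniIndex miniIndex_alt
  rcases hpre with heq | ⟨hlt, _, _⟩
  · subst heq
    simp [miniIndexGo, miniIndexScan]
  · have hA := miniIndexGo_isLM List_ ((upper - lower).toNat + 1) lower upper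
      (le_of_lt hlt) (by omega)
    have hB := miniIndexScan_isLM List_ (upper - lower).toNat lower lower lower upper
      (by omega) ⟨le_refl _, le_refl _, by intro i h1 h2; simp [show i = lower by omega], by intro i h1 h2; omega⟩
    exact IsLM_uniq hA hB
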